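-- pv_equiv track=rewrite | github.com/tsuru7/algorithm-study | AtCoder/MAYOCON/2022/12/26/2.py | solve
-- ===== SOURCE A (Python) =====
-- def solve(n,a):
--     count = [0 for _ in range(200)]
--     for i in range(n):
--         j = a[i] % 200
--         count[j] += 1
--     ans=0
--     for i in range(200):
--         ans += count[i]*(count[i]-1)//2
--     return ans
-- ===== SOURCE B (Python) =====
-- def solve(n, a):
--     count = {}
--     ans = 0
--     for x in a[:max(n, 0)]:
--         r = x % 200
--         c = count.get(r, 0)
--         ans += c
--         count[r] = c + 1
--     return ans
-- ===== Notes on version B (the rewrite author's own statement) =====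
-- stated objective: alternative
-- what changed: Replaces A's two-phase computation (build a 200-slot histogram, then a second closed-form pass summing C(k,2)) by a single incremental pass that, for each element, adds the number of earlier elements with the same residue mod 200 to the answer while maintaining a running dict counter.
import Mathlib
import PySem

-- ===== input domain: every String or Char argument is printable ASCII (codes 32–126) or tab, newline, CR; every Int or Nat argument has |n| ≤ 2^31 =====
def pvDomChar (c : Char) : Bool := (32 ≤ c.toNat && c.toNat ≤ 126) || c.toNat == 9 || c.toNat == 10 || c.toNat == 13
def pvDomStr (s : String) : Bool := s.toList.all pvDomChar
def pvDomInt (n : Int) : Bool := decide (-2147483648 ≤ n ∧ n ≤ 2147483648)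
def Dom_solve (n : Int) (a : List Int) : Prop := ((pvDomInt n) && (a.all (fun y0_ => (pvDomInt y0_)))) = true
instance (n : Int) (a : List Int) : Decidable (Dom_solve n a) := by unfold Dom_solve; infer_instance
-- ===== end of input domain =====

-- B replaces A's two-phase histogram-then-sum-of-C(k,2) computation by a single
-- incremental pass adding, per element, the number of earlier elements with the same
-- residue mod 200 (objective: alternative decomposition, same cost).


-- ===== PORT A =====
def solve (n : Int) (a : List Int) : Int :=
  let count : List Int := (PySem.List.pyRange 0 200 1).map (fun _ => 0)
  let count := (PySem.List.pyRange 0 n 1).foldl (fun count i =>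
    let j := PySem.Int.mod (PySem.List.pyGetD a i 0) 200
    PySem.List.pySetD count j (PySem.List.pyGetD count j 0 + 1)) count
  let ans : Int := 0
  (PySem.List.pyRange 0 200 1).foldl (fun ans i =>
    ans + PySem.Int.floordiv (PySem.List.pyGetD count i 0 * (PySem.List.pyGetD count i 0 - 1)) 2) ans

-- ===== PORT B =====
def solve_alt (n : Int) (a : List Int) : Int :=
  ((PySem.List.slice a none (some (max n 0))).foldl
    (fun (st : PySem.Dict Int Int × Int) x =>
      let r := PySem.Int.mod x 200
      let c := st.1.getD r 0
      (st.1.insert r (c + 1), st.2 + c))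
    (PySem.Dict.empty, 0)).2

-- ===== PRECONDITION & SPEC =====
-- Pre_ excludes exactly n > len(a), where A's a[i] raises IndexError.
def Pre_solve (n : Int) (a : List Int) : Prop := n ≤ (a.length : Int)
instance (n : Int) (a : List Int) : Decidable (Pre_solve n a) := by unfold Pre_solve; infer_instance
def pvWitness_solve : Int × List Int := (3, [1, 201, 401])
def Spec_solve (n : Int) (a : List Int) (out : Int) : Prop := out = solve_alt n a
instance (n : Int) (a : List Int) (out : Int) : Decidable (Spec_solve n a out) := by unfold Spec_solve; infer_instance

-- ===== CLAIM (what is proved, stated in full; the proofs are below) =====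
def Claim_equal_solve : Prop := ∀ (n : Int) (a : List Int), Dom_solve n a → Pre_solve n a → Spec_solve n a (solve n a)

-- ===== LEMMAS AND PROOFS =====

-- residue mod 200, Python semantics
def pvRes (x : Int) : Int := PySem.Int.mod x 200
-- C(k,2) exactly as A computes it
def pvC2 (k : Int) : Int := PySem.Int.floordiv (k * (k - 1)) 2
-- number of elements of L with residue v
def resCnt (L : List Int) (v : Int) : Int := ((L.map pvRes).count v : Int)
-- the common mathematical value of both programs on element list L
def pvSumC2 (L : List Int) : Int := ∑ i ∈ Finset.range 200, pvC2 (resCnt L (i : Int))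
-- A's histogram update step and initial histogram
def pvStepA (c : List Int) (x : Int) : List Int :=
  PySem.List.pySetD c (pvRes x) (PySem.List.pyGetD c (pvRes x) 0 + 1)
def pvInit : List Int := (PySem.List.pyRange 0 200 1).map (fun _ => 0)
def pvHistA (n : Int) (a : List Int) : List Int :=
  (PySem.List.pyRange 0 n 1).foldl (fun c i => pvStepA c (PySem.List.pyGetD a i 0)) pvInit

theorem pvRes_bounds (x : Int) : 0 ≤ pvRes x ∧ pvRes x < 200 :=
  ⟨PySem.Int.mod_nonneg x (by norm_num), PySem.Int.mod_lt x (by norm_num)⟩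

theorem pvC2_succ (k : Int) : pvC2 (k + 1) = pvC2 k + k := by
  unfold pvC2
  rw [PySem.Int.floordiv_eq_ediv_of_pos (by norm_num),
      PySem.Int.floordiv_eq_ediv_of_pos (by norm_num)]
  obtain ⟨m, hm⟩ : Even (k * (k - 1)) := by
    rcases Int.even_or_odd k with h | h
    · exact h.mul_right _
    · exact (h.sub_odd odd_one).mul_left _
  have h2 : (k + 1) * ((k + 1) - 1) = k * (k - 1) + 2 * k := by ring
  omega

theorem pvC2_zero : pvC2 0 = 0 := by decide

theorem sum_range_map (n : Nat) (f : Nat → Int) :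
    ((List.range n).map f).sum = ∑ i ∈ Finset.range n, f i := by
  induction n with
  | zero => simp
  | succ m ih =>
    rw [List.range_succ, Finset.sum_range_succ, List.map_append, List.sum_append, ih]; simp

theorem resCnt_cons (x : Int) (L : List Int) (v : Int) :
    resCnt (x :: L) v = resCnt L v + if pvRes x = v then 1 else 0 := by
  unfold resCnt
  rw [List.map_cons, List.count_cons]
  by_cases h : pvRes x = v
  · simp [h]
  · simp [h]

theorem resCnt_append (M : List Int) (x v : Int) :
    resCnt (M ++ [x]) v = resCnt M v + if pvRes x = v then 1 else 0 := by
  unfold resCnt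
  rw [List.map_append, List.count_append]
  by_cases h : pvRes x = v
  · simp [h]
  · simp [h]

theorem sum_step (M : List Int) (x : Int) :
    pvSumC2 (M ++ [x]) = pvSumC2 M + resCnt M (pvRes x) := by
  have hb := pvRes_bounds x
  have hcast : (((pvRes x).toNat : Nat) : Int) = pvRes x := Int.toNat_of_nonneg hb.1
  have hmem : (pvRes x).toNat ∈ Finset.range 200 := by
    simp only [Finset.mem_range]; omega
  unfold pvSumC2
  rw [Finset.sum_eq_sum_diff_singleton_add hmem (fun i => pvC2 (resCnt (M ++ [x]) (i : Int))),
      Finset.sum_eq_sum_diff_singleton_add hmem (fun i => pvC2 (resCnt M (i : Int)))]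
  have hdiff : ∀ i ∈ Finset.range 200 \ {(pvRes x).toNat},
      pvC2 (resCnt (M ++ [x]) (i : Int)) = pvC2 (resCnt M (i : Int)) := by
    intro i hi
    rw [Finset.mem_sdiff, Finset.mem_singleton] at hi
    have hne : pvRes x ≠ (i : Int) := by omega
    rw [resCnt_append, if_neg hne, add_zero]
  rw [Finset.sum_congr rfl hdiff, resCnt_append, hcast, if_pos rfl, pvC2_succ]
  ring

-- ===== B side =====

theorem bfold_fst (L : List Int) (d : PySem.Dict Int Int) (a0 : Int) :
    (L.foldl (fun (st : PySem.Dict Int Int × Int) x =>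
        let r := PySem.Int.mod x 200
        let c := st.1.getD r 0
        (st.1.insert r (c + 1), st.2 + c)) (d, a0)).1
    = (L.map pvRes).foldl (fun d y => d.insert y (d.getD y 0 + 1)) d := by
  induction L generalizing d a0 with
  | nil => rfl
  | cons x L ih => simpa [pvRes] using ih _ _

theorem bfold_snd_append (M : List Int) (x : Int) (s : PySem.Dict Int Int × Int) :
    ((M ++ [x]).foldl (fun (st : PySem.Dict Int Int × Int) y =>
        let r := PySem.Int.mod y 200
        let c := st.1.getD r 0
        (st.1.insert r (c + 1), st.2 + c)) s).2
    = (M.foldl (fun (st : PySem.Dict Int Int × Int) y =>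
        let r := PySem.Int.mod y 200
        let c := st.1.getD r 0
        (st.1.insert r (c + 1), st.2 + c)) s).2
      + (M.foldl (fun (st : PySem.Dict Int Int × Int) y =>
        let r := PySem.Int.mod y 200
        let c := st.1.getD r 0
        (st.1.insert r (c + 1), st.2 + c)) s).1.getD (pvRes x) 0 := by
  rw [List.foldl_append]; rfl

theorem bfold_main (L : List Int) :
    (L.foldl (fun (st : PySem.Dict Int Int × Int) x =>
        let r := PySem.Int.mod x 200
        let c := st.1.getD r 0
        (st.1.insert r (c + 1), st.2 + c)) (PySem.Dict.empty, 0)).2 = pvSumC2 L := by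
  induction L using List.reverseRecOn with
  | nil => simp [pvSumC2, resCnt, pvC2_zero]
  | append_singleton M x ih =>
    rw [bfold_snd_append, ih, bfold_fst, PySem.Dict.getD_foldl_insert_add_one, sum_step]
    simp [resCnt]

-- ===== A side =====

theorem pyRange200 :
    PySem.List.pyRange 0 200 1 = List.map (fun k => ((k : Nat) : Int)) (List.range 200) := by
  have h := PySem.List.pyRange_zero_nat 200
  norm_num at h
  exact h

theorem pvInit_length : pvInit.length = 200 := by
  rw [pvInit, pyRange200, List.length_map, List.length_map, List.length_range]

theorem pvInit_getD (v : Nat) : PySem.List.pyGetD pvInit (v : Int) 0 = 0 := by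
  rw [PySem.List.pyGetD_natCast]
  unfold pvInit
  rw [List.getD_eq_getElem?_getD]
  rcases h : ((PySem.List.pyRange 0 200 1).map (fun _ => (0 : Int)))[v]? with _ | x
  · rfl
  · have hx : x ∈ (PySem.List.pyRange 0 200 1).map (fun _ => (0 : Int)) :=
      List.mem_of_getElem? h
    obtain ⟨_, _, rfl⟩ := List.mem_map.1 hx
    rfl

theorem hist_getD (L : List Int) (c : List Int) (hc : c.length = 200) (v : Nat) :
    PySem.List.pyGetD (L.foldl pvStepA c) (v : Int) 0
    = PySem.List.pyGetD c (v : Int) 0 + resCnt L (v : Int) := by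
  induction L generalizing c with
  | nil => simp [resCnt]
  | cons x L ih =>
    have hb := pvRes_bounds x
    have hcast : (((pvRes x).toNat : Nat) : Int) = pvRes x := Int.toNat_of_nonneg hb.1
    have hlt : (pvRes x).toNat < c.length := by omega
    rw [List.foldl_cons]
    rw [show pvStepA c x
        = PySem.List.pySetD c (pvRes x) (PySem.List.pyGetD c (pvRes x) 0 + 1) from rfl]
    rw [ih _ (by rw [PySem.List.length_pySetD]; exact hc), resCnt_cons, ← hcast,
        PySem.List.pyGetD_pySetD_natCast c _ v _ _ hlt]
    by_cases h : v = (pvRes x).toNat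
    · rw [if_pos h, if_pos (by omega), h]; ring
    · rw [if_neg h, if_neg (by omega)]; ring

theorem histA_eq (n : Int) (a : List Int) (hpre : n ≤ (a.length : Int)) :
    pvHistA n a = (a.take n.toNat).foldl pvStepA pvInit := by
  unfold pvHistA
  by_cases hn : n ≤ 0
  · rw [PySem.List.pyRange_one_eq_nil hn]
    have h0 : n.toNat = 0 := by omega
    rw [h0, List.take_zero]
    rfl
  · have hn' : 0 < n := by omega
    rw [PySem.List.foldl_congr_mem _ _
        (fun c i => pvStepA c (PySem.List.pyGetD (a.take n.toNat) i 0)) _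
        (by
          intro acc i hi
          rw [PySem.List.mem_pyRange_one] at hi
          have hgd : PySem.List.pyGetD a i 0 = PySem.List.pyGetD (a.take n.toNat) i 0 := by
            rw [PySem.List.pyGetD_of_nonneg a 0 hi.1,
                PySem.List.pyGetD_of_nonneg (a.take n.toNat) 0 hi.1]
            have hit : i.toNat < n.toNat := by omega
            simp [List.getD, List.getElem?_take_of_lt hit]
          rw [hgd])]
    set xs := a.take n.toNat with hxs
    have hlen : xs.length = n.toNat := by
      rw [hxs, List.length_take]; omega
    have hlenx : n = PySem.List.len xs := by
      rw [PySem.List.len, hlen]; omega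
    rw [hlenx, PySem.List.foldl_pyRange_zero_pyGetD xs 0 pvStepA]

theorem solve_eq_sum (n : Int) (a : List Int) (hpre : n ≤ (a.length : Int)) :
    solve n a = pvSumC2 (a.take n.toNat) := by
  have hsolve : solve n a = (PySem.List.pyRange 0 200 1).foldl
      (fun ans i => ans + PySem.Int.floordiv
        (PySem.List.pyGetD (pvHistA n a) i 0 * (PySem.List.pyGetD (pvHistA n a) i 0 - 1)) 2) 0 := rfl
  rw [hsolve, PySem.List.foldl_add _
      (fun i => PySem.Int.floordiv
        (PySem.List.pyGetD (pvHistA n a) i 0 * (PySem.List.pyGetD (pvHistA n a) i 0 - 1)) 2) 0,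
      zero_add, pyRange200, List.map_map, sum_range_map]
  unfold pvSumC2
  apply Finset.sum_congr rfl
  intro i hi
  simp only [Function.comp]
  rw [histA_eq n a hpre, hist_getD _ pvInit pvInit_length i, pvInit_getD i, zero_add]
  rfl

-- ===== VERDICT (by name: the statement is the Claim_ definition above) =====
theorem solve_spec : Claim_equal_solve := by
  intro n a _ hpre
  unfold Pre_solve at hpre
  unfold Spec_solve solve_alt
  have hslice : PySem.List.slice a none (some (max n 0)) = a.take n.toNat := by
    rw [PySem.List.slice_to a (le_max_right n 0)]
    congr 1
    omega
  rw [hslice, bfold_main, solve_eq_sum n a hpre]
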